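-- pv_equiv track=rewrite | github.com/FlashXT/EBSN_EventTopicsAnalysis | src/GroupTopicesAnalysis.py | topicsSumByGroup
-- ===== SOURCE A (Python) =====
-- def topicsSumByGroup(topics):
--     topicsum = []
--     topicsSummary = []
--     i = 0
--     temp = 0
--     groupid = topics[0][0]
--     gtoipcs = [groupid]
--     while i < len(topics):
--         if topics[i][0] == groupid:
--             gtoipcs.append(topics[i][3])
--             i = i+1
--         else:
--             topicsSummary.append(gtoipcs)
--             topicsum.append([groupid,i - temp])
--             groupid = topics[i][0]
--             temp = i
--             gtoipcs = []
--             gtoipcs.append(topics[i][0])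
--
--     return topicsum,topicsSummary
-- ===== SOURCE B (Python) =====
-- def _brk_starts(topics):
--     return [0] + [i for i in range(1, len(topics)) if topics[i][0] != topics[i - 1][0]]
--
-- def _count_row(topics, s, e):
--     return [topics[s][0], e - s]
--
-- def _summary_row(topics, s, e):
--     return [topics[s][0]] + [topics[k][3] for k in range(s, e)]
--
-- def topicsSumByGroup(topics):
--     starts = _brk_starts(topics)
--     pairs = list(zip(starts, starts[1:]))
--     return ([_count_row(topics, s, e) for s, e in pairs],
--             [_summary_row(topics, s, e) for s, e in pairs])
-- ===== Notes on version B (the rewrite author's own statement) =====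
-- stated objective: alternative
-- what changed: Replaces A's single stateful while-loop (mutable groupid/temp/gtoipcs accumulators, no i-advance on a group change) with a two-phase decomposition: first compute all group-start indices, then build both result lists from consecutive (start,end) index pairs; iterating only over pairs naturally omits the final group, like A.
import Mathlib
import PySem

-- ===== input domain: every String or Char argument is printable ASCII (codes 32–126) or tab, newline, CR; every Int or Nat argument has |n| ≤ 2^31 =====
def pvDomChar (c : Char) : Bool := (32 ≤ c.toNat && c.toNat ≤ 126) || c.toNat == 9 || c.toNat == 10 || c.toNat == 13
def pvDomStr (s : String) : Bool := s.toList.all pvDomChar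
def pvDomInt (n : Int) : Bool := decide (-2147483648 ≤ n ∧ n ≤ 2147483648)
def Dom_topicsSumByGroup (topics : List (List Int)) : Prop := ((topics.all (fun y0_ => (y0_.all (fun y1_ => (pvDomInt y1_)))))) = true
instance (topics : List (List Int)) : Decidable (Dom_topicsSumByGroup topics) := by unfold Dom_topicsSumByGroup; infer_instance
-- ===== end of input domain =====

-- B replaces A's single stateful while-loop with a two-phase decomposition (group-start
-- indices first, then both outputs from consecutive start pairs); same return value on Pre_.

-- ===== PORT A =====
-- Python's topics[i][0]/topics[i][3] is ported as List.getD: inside Pre_ every index used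
-- by A is a nonnegative in-range index, where getD equals Python indexing exactly.
-- The while loop is ported with a fuel parameter (2*len+1, enough for every run: each row
-- is consumed once and each group change repeats one index) purely as a totality guard.
def topicsSumByGroup_loop (topics : List (List Int)) :
    Nat → Nat → Nat → Int → List Int → List (List Int) → List (List Int) →
    List (List Int) × List (List Int)
  | 0, _i, _temp, _groupid, _gtoipcs, topicsum, topicsSummary => (topicsum, topicsSummary)
  | Nat.succ f, i, temp, groupid, gtoipcs, topicsum, topicsSummary =>
    if i < topics.length then
      if (topics.getD i []).getD 0 0 = groupid then
        topicsSumByGroup_loop topics f (i + 1) temp groupid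
          (gtoipcs ++ [(topics.getD i []).getD 3 0]) topicsum topicsSummary
      else
        topicsSumByGroup_loop topics f i i ((topics.getD i []).getD 0 0)
          [(topics.getD i []).getD 0 0]
          (topicsum ++ [[groupid, (i : Int) - (temp : Int)]])
          (topicsSummary ++ [gtoipcs])
    else
      (topicsum, topicsSummary)

def topicsSumByGroup (topics : List (List Int)) : List (List Int) × List (List Int) :=
  topicsSumByGroup_loop topics (2 * topics.length + 1) 0 0 ((topics.getD 0 []).getD 0 0)
    [(topics.getD 0 []).getD 0 0] [] []

-- ===== PORT B =====
def pvStarts (topics : List (List Int)) : List Nat :=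
  0 :: (List.range' 1 (topics.length - 1)).filter
      (fun i => (topics.getD i []).getD 0 0 != (topics.getD (i - 1) []).getD 0 0)

def pvCountRow (topics : List (List Int)) (s e : Nat) : List Int :=
  [(topics.getD s []).getD 0 0, (e : Int) - (s : Int)]

def pvSummaryRow (topics : List (List Int)) (s e : Nat) : List Int :=
  (topics.getD s []).getD 0 0 :: (List.range' s (e - s)).map (fun k => (topics.getD k []).getD 3 0)

def topicsSumByGroup_alt (topics : List (List Int)) : List (List Int) × List (List Int) :=
  let starts := pvStarts topics
  let pairs := starts.zip starts.tail
  (pairs.map (fun se => pvCountRow topics se.1 se.2),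
   pairs.map (fun se => pvSummaryRow topics se.1 se.2))

-- ===== PRECONDITION & SPEC =====
-- Pre_ excludes exactly the inputs where Python A raises IndexError: the empty list
-- (topics[0][0]) and any row shorter than 4 (every row's [0] and [3] are read).
def Pre_topicsSumByGroup (topics : List (List Int)) : Prop :=
  topics ≠ [] ∧ ∀ row ∈ topics, 4 ≤ row.length
instance (topics : List (List Int)) : Decidable (Pre_topicsSumByGroup topics) := by
  unfold Pre_topicsSumByGroup; infer_instance

def pvWitness_topicsSumByGroup : List (List Int) :=
  [[1, 0, 0, 5], [1, 0, 0, 6], [2, 0, 0, 7]]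

def Spec_topicsSumByGroup (topics : List (List Int)) (out : List (List Int) × List (List Int)) : Prop := out = topicsSumByGroup_alt topics
instance (topics : List (List Int)) (out : List (List Int) × List (List Int)) : Decidable (Spec_topicsSumByGroup topics out) := by unfold Spec_topicsSumByGroup; infer_instance

-- ===== CLAIM (what is proved, stated in full; the proofs are below) =====
def Claim_equal_topicsSumByGroup : Prop := ∀ (topics : List (List Int)), Dom_topicsSumByGroup topics → Pre_topicsSumByGroup topics → Spec_topicsSumByGroup topics (topicsSumByGroup topics)

-- ===== LEMMAS AND PROOFS =====

-- group-start indices at position ≥ i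
def pvBrksFrom (topics : List (List Int)) (i : Nat) : List Nat :=
  (List.range' i (topics.length - i)).filter
      (fun j => (topics.getD j []).getD 0 0 != (topics.getD (j - 1) []).getD 0 0)

lemma loop_char (topics : List (List Int)) :
    ∀ m f i temp (sum summ : List (List Int)),
      topics.length - i ≤ m → 2 * (topics.length - i) + 1 ≤ f → temp < i →
      i ≤ topics.length →
      (∀ j, temp ≤ j → j < i →
        (topics.getD j []).getD 0 0 = (topics.getD temp []).getD 0 0) →
      topicsSumByGroup_loop topics f i temp ((topics.getD temp []).getD 0 0)
          (pvSummaryRow topics temp i) sum summ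
      = (sum ++ ((temp :: pvBrksFrom topics i).zip (pvBrksFrom topics i)).map
            (fun se => pvCountRow topics se.1 se.2),
         summ ++ ((temp :: pvBrksFrom topics i).zip (pvBrksFrom topics i)).map
            (fun se => pvSummaryRow topics se.1 se.2)) := by
  intro m
  induction m with
  | zero =>
    intro f i temp sum summ hm hf hti hin _
    obtain ⟨f, rfl⟩ : ∃ g, f = g + 1 := ⟨f - 1, by omega⟩
    rw [topicsSumByGroup_loop, if_neg (by omega : ¬ i < topics.length)]
    have hi : topics.length - i = 0 := by omega
    simp [pvBrksFrom, hi]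
  | succ m ih =>
    intro f i temp sum summ hm hf hti hin inv
    obtain ⟨f, rfl⟩ : ∃ g, f = g + 1 := ⟨f - 1, by omega⟩
    by_cases hlt : i < topics.length
    · have h1 : topics.length - i = (topics.length - (i + 1)) + 1 := by omega
      have hprev : (topics.getD (i - 1) []).getD 0 0
          = (topics.getD temp []).getD 0 0 := inv (i - 1) (by omega) (by omega)
      by_cases h : (topics.getD i []).getD 0 0 = (topics.getD temp []).getD 0 0
      · -- same group: advance i
        rw [topicsSumByGroup_loop, if_pos hlt, if_pos h]
        have hgt : pvSummaryRow topics temp i ++ [(topics.getD i []).getD 3 0]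
            = pvSummaryRow topics temp (i + 1) := by
          have h2 : i + 1 - temp = (i - temp) + 1 := by omega
          have h3 : temp + (i - temp) = i := by omega
          simp [pvSummaryRow, h2, List.range'_1_concat, h3]
        have hbr : pvBrksFrom topics i = pvBrksFrom topics (i + 1) := by
          unfold pvBrksFrom
          rw [h1, List.range'_succ, List.filter_cons]
          have hpred : ((topics.getD i []).getD 0 0 != (topics.getD (i - 1) []).getD 0 0)
              = false := by rw [h, hprev]; simp
          simp only [hpred]
          simp
        rw [hgt,
          ih f (i + 1) temp sum summ (by omega) (by omega) (by omega) (by omega)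
            (fun j hj1 hj2 => by
              rcases Nat.lt_or_ge j i with hj | hj
              · exact inv j hj1 hj
              · have : j = i := by omega
                simpa [this] using h),
          hbr]
      · -- new group: flush, then one matching step
        obtain ⟨f, rfl⟩ : ∃ g, f = g + 1 := ⟨f - 1, by omega⟩
        rw [topicsSumByGroup_loop, if_pos hlt, if_neg h,
          topicsSumByGroup_loop, if_pos hlt, if_pos rfl]
        have hgt : [(topics.getD i []).getD 0 0] ++ [(topics.getD i []).getD 3 0]
            = pvSummaryRow topics i (i + 1) := by
          simp [pvSummaryRow]
        rw [hgt,
          ih f (i + 1) i (sum ++ [[(topics.getD temp []).getD 0 0, (i : Int) - (temp : Int)]])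
            (summ ++ [pvSummaryRow topics temp i]) (by omega) (by omega) (by omega) (by omega)
            (fun j hj1 hj2 => congrArg (fun t => (topics.getD t []).getD 0 0) (by omega : j = i))]
        have hbr : pvBrksFrom topics i = i :: pvBrksFrom topics (i + 1) := by
          unfold pvBrksFrom
          rw [h1, List.range'_succ, List.filter_cons]
          have hpred : ((topics.getD i []).getD 0 0 != (topics.getD (i - 1) []).getD 0 0)
              = true := by rw [hprev]; simp only [bne_iff_ne, ne_eq]; exact h
          simp only [hpred]
          simp
        rw [hbr]
        simp [pvCountRow]
    · rw [topicsSumByGroup_loop, if_neg hlt]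
      have hi : topics.length - i = 0 := by omega
      simp [pvBrksFrom, hi]

theorem topicsSumByGroup_spec : Claim_equal_topicsSumByGroup := by
  intro topics _ hpre
  unfold Spec_topicsSumByGroup
  obtain ⟨hne, _⟩ := hpre
  have hn : 1 ≤ topics.length := by
    cases topics with
    | nil => exact absurd rfl hne
    | cons a l => simp
  rw [topicsSumByGroup, topicsSumByGroup_loop, if_pos (by omega : 0 < topics.length),
    if_pos rfl]
  have h0 : [(topics.getD 0 []).getD 0 0] ++ [(topics.getD 0 []).getD 3 0]
      = pvSummaryRow topics 0 1 := by simp [pvSummaryRow]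
  rw [h0,
    loop_char topics topics.length (2 * topics.length) 1 0 [] [] (by omega) (by omega)
      (by omega) (by omega)
      (fun j hj1 hj2 => congrArg (fun t => (topics.getD t []).getD 0 0) (by omega : j = 0))]
  have hstarts : pvStarts topics = 0 :: pvBrksFrom topics 1 := by
    simp [pvStarts, pvBrksFrom]
  simp [topicsSumByGroup_alt, hstarts]
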